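-- pv_equiv track=rewrite | github.com/dfo-meds/cnodc | src/cnodc/dmd/metadata.py | autodetect_resource_type
-- ===== SOURCE A (Python) =====
-- import typing as t
--
-- def autodetect_resource_type(full_url: t.Optional[dict]):
--     if full_url is None:
--         return None
--     url = ""
--     if 'und' in full_url:
--         url = full_url['und']
--     elif 'en' in full_url:
--         url = full_url['und']
--     else:
--         for key in full_url.keys():
--             url = full_url[key]
--             break
--     if url.startswith("https://"):
--         return "https"
--     elif url.startswith("http://"):
--         return "http"
--     elif url.startswith("ftp://"):
--         return "ftp"
--     elif url.startswith("git://"):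
--         return 'git'
--     elif url.startswith("file://"):
--         return 'file'
--     return None
-- ===== SOURCE B (Python) =====
-- import typing as t
--
-- def autodetect_resource_type(full_url: t.Optional[dict]):
--     if full_url is None:
--         return None
--     url = full_url.get('und', next(iter(full_url.values()), ""))
--     i = url.find('://')
--     if i < 0:
--         return None
--     scheme = url[:i]
--     return scheme if scheme in ('https', 'http', 'ftp', 'git', 'file') else None
-- ===== Notes on version B (the rewrite author's own statement) =====
-- stated objective: idiomatic
-- what changed: URL selection becomes a single dict.get with first-value default instead of the if/elif/for-break chain, and the five-branch startswith cascade becomes one find('://') parse of the scheme followed by a single membership test.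
import Mathlib
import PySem

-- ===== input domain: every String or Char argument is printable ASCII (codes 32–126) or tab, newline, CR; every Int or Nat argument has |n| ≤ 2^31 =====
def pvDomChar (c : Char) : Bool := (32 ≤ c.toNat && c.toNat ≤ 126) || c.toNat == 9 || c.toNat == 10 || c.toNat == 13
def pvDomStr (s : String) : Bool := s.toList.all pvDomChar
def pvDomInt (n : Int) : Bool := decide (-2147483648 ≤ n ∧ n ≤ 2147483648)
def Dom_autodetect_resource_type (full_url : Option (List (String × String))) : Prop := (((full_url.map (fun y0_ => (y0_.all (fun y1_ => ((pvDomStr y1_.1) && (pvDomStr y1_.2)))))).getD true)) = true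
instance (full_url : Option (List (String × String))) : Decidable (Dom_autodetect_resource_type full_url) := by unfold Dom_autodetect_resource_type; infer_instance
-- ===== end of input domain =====

-- B replaces A's if/elif/for-break URL selection by dict.get with a first-value default and the
-- five-branch startswith cascade by a single find('://') parse plus one membership test (objective: idiomatic).

-- ===== PORT A =====
def autodetect_resource_type (full_url : Option (List (String × String))) : Option String :=
  match full_url with
  | none => none
  | some l =>
    let d := PySem.Dict.ofList l
    let url : String :=
      if d.contains "und" then d.getD "und" ""
      else if d.contains "en" then d.getD "und" ""   -- full_url['und'] here raises KeyError in Python; Pre_ excludes this case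
      else match d.keys with                          -- for key in full_url.keys(): url = full_url[key]; break
        | [] => ""
        | k :: _ => d.getD k ""
    if PySem.Str.startswith url "https://" then some "https"
    else if PySem.Str.startswith url "http://" then some "http"
    else if PySem.Str.startswith url "ftp://" then some "ftp"
    else if PySem.Str.startswith url "git://" then some "git"
    else if PySem.Str.startswith url "file://" then some "file"
    else none

-- ===== PORT B =====
def autodetect_resource_type_alt (full_url : Option (List (String × String))) : Option String :=
  match full_url with
  | none => none
  | some l =>
    let d := PySem.Dict.ofList l
    let url : String := ((d.get? "und").getD (d.values.headD ""))   -- full_url.get('und', next(iter(full_url.values()), ""))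
    let i : Int := PySem.Str.find url "://"
    if i < 0 then none
    else
      let scheme := PySem.Str.slice url none (some i)
      if scheme == "https" || scheme == "http" || scheme == "ftp" || scheme == "git" || scheme == "file" then
        some scheme
      else none

-- ===== PRECONDITION & SPEC =====
-- Pre_ excludes exactly the dicts containing key 'en' but not 'und': there A's 'en' branch
-- evaluates full_url['und'] and raises KeyError (A returns no value).
def Pre_autodetect_resource_type (full_url : Option (List (String × String))) : Prop :=
  (match full_url with
   | none => true
   | some l => !(PySem.Dict.ofList l).contains "en" || (PySem.Dict.ofList l).contains "und") = true
instance (full_url : Option (List (String × String))) : Decidable (Pre_autodetect_resource_type full_url) := by unfold Pre_autodetect_resource_type; infer_instance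

def pvWitness_autodetect_resource_type : (Option (List (String × String))) := some [("und", "https://example.org")]

def Spec_autodetect_resource_type (full_url : Option (List (String × String))) (out : Option String) : Prop := out = autodetect_resource_type_alt full_url
instance (full_url : Option (List (String × String))) (out : Option String) : Decidable (Spec_autodetect_resource_type full_url out) := by unfold Spec_autodetect_resource_type; infer_instance

-- ===== CLAIM (what is proved, stated in full; the proofs are below) =====
def Claim_equal_autodetect_resource_type : Prop := ∀ (full_url : Option (List (String × String))), Dom_autodetect_resource_type full_url → Pre_autodetect_resource_type full_url → Spec_autodetect_resource_type full_url (autodetect_resource_type full_url)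
-- ===== LEMMAS AND PROOFS =====

-- find points at k when an occurrence starts at k and none starts earlier
theorem find_eq_of_first (s sub : List Char) (k : Nat)
    (h1 : sub <+: s.drop k) (h2 : ∀ j < k, ¬ sub <+: s.drop j) :
    PySem.Chars.find s sub = (k : Int) := by
  have hnn : 0 ≤ PySem.Chars.find s sub := by
    rw [PySem.Chars.find_nonneg_iff]
    rw [← PySem.Chars.isIn_iff_infix, ← PySem.Chars.exists_prefix_drop_iff_isIn]
    exact ⟨k, h1⟩
  obtain ⟨hocc, hmin⟩ := PySem.Chars.find_spec hnn
  have hk1 : ¬ (PySem.Chars.find s sub).toNat < k := fun h => h2 _ h hocc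
  have hk2 : ¬ k < (PySem.Chars.find s sub).toNat := fun h => hmin _ h h1
  omega

-- '://' cannot start inside a colon-free prefix of s
theorem no_colon_prefix (s p : List Char) (hp : ∀ j (h : j < p.length), p[j] ≠ ':')
    (hpre : p <+: s) (j : Nat) (hj : j < p.length) : ¬ ("://".toList <+: s.drop j) := by
  intro hcc
  have hhead : (s.drop j).head? = some ':' := by
    obtain ⟨t2, ht2⟩ := hcc
    rw [← ht2]
    simp [show "://".toList = ':' :: '/' :: '/' :: [] from rfl]
  rw [List.head?_drop] at hhead
  obtain ⟨t, ht⟩ := hpre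
  rw [← ht, List.getElem?_append_left hj, List.getElem?_eq_getElem hj] at hhead
  exact hp j hj (by simpa using hhead)

-- one scheme case: startswith (p ++ '://') forces find = |p| and take |p| = p
theorem find_of_startswith (s p : List Char) (hp : ∀ j (h : j < p.length), p[j] ≠ ':')
    (h : (p ++ "://".toList) <+: s) :
    PySem.Chars.find s "://".toList = (p.length : Int) ∧ s.take p.length = p := by
  obtain ⟨t, ht⟩ := h
  constructor
  · apply find_eq_of_first
    · rw [← ht, List.append_assoc, List.drop_append_of_le_length (by simp), List.drop_length]
      exact ⟨t, by simp⟩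
    · intro j hj
      exact no_colon_prefix s p hp ⟨"://".toList ++ t, by simpa [List.append_assoc] using ht⟩ j hj
  · rw [← ht, List.append_assoc, List.take_append_of_le_length (by simp), List.take_length]

-- the occurrence of '://' found at k, glued after the scheme s.take k, is a prefix of s
theorem scheme_of_find (s : List Char) (k : Nat) (hocc : "://".toList <+: s.drop k)
    (p : List Char) (htake : s.take k = p) : (p ++ "://".toList) <+: s := by
  obtain ⟨t, ht⟩ := hocc
  refine ⟨t, ?_⟩
  rw [List.append_assoc, htake.symm, ht, List.take_append_drop]

-- A's five-branch startswith cascade equals B's single find('://') parse, for every url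
theorem cascade_eq (url : String) :
    (if PySem.Str.startswith url "https://" then some "https"
     else if PySem.Str.startswith url "http://" then some "http"
     else if PySem.Str.startswith url "ftp://" then some "ftp"
     else if PySem.Str.startswith url "git://" then some "git"
     else if PySem.Str.startswith url "file://" then some "file"
     else none) =
    (let i : Int := PySem.Str.find url "://"
     if i < 0 then none
     else
       let scheme := PySem.Str.slice url none (some i)
       if scheme == "https" || scheme == "http" || scheme == "ftp" || scheme == "git" || scheme == "file" then
         some scheme
       else none) := by
  have hcase : ∀ (pstr : String), (∀ j (h : j < pstr.toList.length), pstr.toList[j] ≠ ':') →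
      (pstr.toList ++ "://".toList) <+: url.toList →
      PySem.Chars.find url.toList "://".toList = (pstr.toList.length : Int) ∧
        PySem.Str.slice url none (some (pstr.toList.length : Int)) = pstr := by
    intro pstr hp h
    obtain ⟨hfind, htake⟩ := find_of_startswith url.toList pstr.toList hp h
    refine ⟨hfind, String.toList_inj.mp ?_⟩
    rw [PySem.Str.toList_slice, PySem.Chars.slice_eq_listSlice,
      PySem.List.slice_to _ (by positivity), Int.toNat_natCast, htake]
  have hpref : ∀ (pstr sfull : String), pstr.toList ++ "://".toList = sfull.toList →
      PySem.Str.startswith url sfull = true → (pstr.toList ++ "://".toList) <+: url.toList := by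
    intro pstr sfull he hsw
    rw [he]
    rw [PySem.Str.startswith_eq, PySem.Chars.startswith_iff] at hsw
    exact hsw
  by_cases h1 : PySem.Str.startswith url "https://" = true
  · obtain ⟨hf, hsl⟩ := hcase "https" (by decide) (hpref "https" "https://" (by decide) h1)
    clear hcase hpref
    simp at hf hsl
    simp_all
  · by_cases h2 : PySem.Str.startswith url "http://" = true
    · obtain ⟨hf, hsl⟩ := hcase "http" (by decide) (hpref "http" "http://" (by decide) h2)
      clear hcase hpref
      simp at hf hsl
      simp_all
    · by_cases h3 : PySem.Str.startswith url "ftp://" = true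
      · obtain ⟨hf, hsl⟩ := hcase "ftp" (by decide) (hpref "ftp" "ftp://" (by decide) h3)
        clear hcase hpref
        simp at hf hsl
        simp_all
      · by_cases h4 : PySem.Str.startswith url "git://" = true
        · obtain ⟨hf, hsl⟩ := hcase "git" (by decide) (hpref "git" "git://" (by decide) h4)
          clear hcase hpref
          simp at hf hsl
          simp_all
        · by_cases h5 : PySem.Str.startswith url "file://" = true
          · obtain ⟨hf, hsl⟩ := hcase "file" (by decide) (hpref "file" "file://" (by decide) h5)
            clear hcase hpref
            simp at hf hsl
            simp_all
          · -- all five prefixes fail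
            rw [if_neg h1, if_neg h2, if_neg h3, if_neg h4, if_neg h5]
            by_cases hneg : PySem.Str.find url "://" < 0
            · rw [if_pos hneg]
            · rw [Int.not_lt] at hneg
              rw [PySem.Str.find_eq] at hneg
              obtain ⟨hocc, -⟩ := PySem.Chars.find_spec hneg
              set k : Nat := (PySem.Chars.find url.toList "://".toList).toNat with hk
              have hfk : PySem.Chars.find url.toList "://".toList = (k : Int) := by omega
              have hsl : (PySem.Str.slice url none (some (k : Int))).toList = url.toList.take k := by
                rw [PySem.Str.toList_slice, PySem.Chars.slice_eq_listSlice,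
                  PySem.List.slice_to _ (by positivity), Int.toNat_natCast]
              have hnot : ∀ (pstr sfull : String), pstr.toList ++ "://".toList = sfull.toList →
                  PySem.Str.slice url none (some (k : Int)) = pstr →
                  PySem.Str.startswith url sfull = true := by
                intro pstr sfull he hpeq
                rw [PySem.Str.startswith_eq, PySem.Chars.startswith_iff, ← he]
                apply scheme_of_find url.toList k hocc
                rw [← hsl, hpeq]
              simp only [PySem.Str.find_eq, hfk]
              have hlt : ¬ ((k : Int) < 0) := by omega
              rw [if_neg hlt]
              split
              next hbeq =>
                exfalso
                simp only [Bool.or_eq_true, beq_iff_eq] at hbeq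
                rcases hbeq with ((((e|e)|e)|e)|e)
                · exact h1 (hnot "https" "https://" (by decide) e)
                · exact h2 (hnot "http" "http://" (by decide) e)
                · exact h3 (hnot "ftp" "ftp://" (by decide) e)
                · exact h4 (hnot "git" "git://" (by decide) e)
                · exact h5 (hnot "file" "file://" (by decide) e)
              next => rfl

-- A's url selection equals B's get-with-default under Pre_
theorem url_eq (l : List (String × String))
    (hpre : (!(PySem.Dict.ofList l).contains "en" || (PySem.Dict.ofList l).contains "und") = true) :
    (if (PySem.Dict.ofList l).contains "und" then (PySem.Dict.ofList l).getD "und" ""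
     else if (PySem.Dict.ofList l).contains "en" then (PySem.Dict.ofList l).getD "und" ""
     else match (PySem.Dict.ofList l).keys with
       | [] => ""
       | k :: _ => (PySem.Dict.ofList l).getD k "") =
    (((PySem.Dict.ofList l).get? "und").getD ((PySem.Dict.ofList l).values.headD "")) := by
  set d := PySem.Dict.ofList l with hd
  cases hund : d.contains "und" with
  | true =>
    have hvs : (d.get? "und").isSome := by
      rw [← PySem.Dict.contains_eq_isSome_get?]; exact hund
    obtain ⟨v, hv⟩ := Option.isSome_iff_exists.mp hvs
    simp [PySem.Dict.getD, hv]
  | false =>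
    have hen : d.contains "en" = false := by
      revert hpre; rw [hund]; cases d.contains "en" <;> simp
    have hnone : d.get? "und" = none := by
      have h := PySem.Dict.contains_eq_isSome_get? d "und"
      rw [hund] at h
      exact Option.not_isSome_iff_eq_none.mp (by rw [← h]; simp)
    have hvals := PySem.Dict.values_eq_map_keys d (hd ▸ PySem.Dict.nodup_keys_ofList l) ""
    simp only [hen, hnone, Option.getD_none, Bool.false_eq_true, if_false]
    cases hkeys : d.keys with
    | nil => simp [hvals, hkeys]
    | cons k ks => simp [hvals, hkeys]

-- ===== VERDICT (by name: the statement is the Claim_ definition above) =====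
theorem autodetect_resource_type_spec : Claim_equal_autodetect_resource_type := by
  intro full_url _ hpre
  unfold Spec_autodetect_resource_type
  match full_url with
  | none => rfl
  | some l =>
    unfold Pre_autodetect_resource_type at hpre
    simp only [autodetect_resource_type, autodetect_resource_type_alt]
    rw [url_eq l hpre]
    exact cascade_eq _
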